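-- pv_equiv track=rewrite | github.com/nandan-spec/Personalized_Profile_snooplay | debug_filtering.py | overlapping_age_bands
-- ===== SOURCE A (Python) =====
-- def overlapping_age_bands(p):
--     amin = p.get("age_min")
--     amax = p.get("age_max")
--     if amin is None and amax is None:
--         return []
--     try:
--         amin = int(0 if amin is None else amin)
--         amax = int(amax if amax is not None else amin)
--     except Exception:
--         return []
--     if amax < amin:
--         amin, amax = amax, amin
--     bands = {"0-2 yr": (0,2), "3-5 yr": (3,5), "6-8 yr": (6,8), "9-11 yr": (9,11)}
--     out = []
--     for k,(lo,hi) in bands.items():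
--         if not (amax < lo or amin > hi):
--             out.append(k)
--     return out
-- ===== SOURCE B (Python) =====
-- def overlapping_age_bands(p):
--     amin = p.get("age_min")
--     amax = p.get("age_max")
--     if amin is None and amax is None:
--         return []
--     try:
--         amin = int(0 if amin is None else amin)
--         amax = int(amax if amax is not None else amin)
--     except Exception:
--         return []
--     if amax < amin:
--         amin, amax = amax, amin
--     # closed-form band-index range instead of scanning every band
--     kmin = max(0, -((2 - amin) // 3))   # ceil((amin - 2) / 3), clamped at 0
--     kmax = min(3, amax // 3)
--     return [f"{3*k}-{3*k+2} yr" for k in range(kmin, kmax + 1)]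
-- ===== Notes on version B (the rewrite author's own statement) =====
-- stated objective: alternative
-- what changed: Replaces the scan over the four hard-coded bands (dict literal + overlap test per band) by a closed-form computation of the overlapping band-index interval (ceil/floor division) and generates the labels from the indices.
import Mathlib
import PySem

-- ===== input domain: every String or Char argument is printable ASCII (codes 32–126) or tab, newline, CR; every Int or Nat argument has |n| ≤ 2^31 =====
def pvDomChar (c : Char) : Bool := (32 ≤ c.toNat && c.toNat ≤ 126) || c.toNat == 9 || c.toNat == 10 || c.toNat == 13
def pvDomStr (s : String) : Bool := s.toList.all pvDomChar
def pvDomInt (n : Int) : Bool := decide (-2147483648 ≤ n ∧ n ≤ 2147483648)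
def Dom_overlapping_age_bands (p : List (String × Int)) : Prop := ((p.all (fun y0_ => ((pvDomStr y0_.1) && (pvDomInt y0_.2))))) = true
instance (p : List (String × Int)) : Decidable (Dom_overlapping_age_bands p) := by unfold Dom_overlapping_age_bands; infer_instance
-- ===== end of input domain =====

-- B replaces the scan over the four hard-coded bands by a closed-form band-index interval; same result, same cost.
-- (Values are ints by the type convention, so Python's int() is the identity and the try/except never fires; ported as such — exact.)

-- ===== PORT A =====
def overlapping_age_bands (p : List (String × Int)) : List String :=
  let amin? := (PySem.Dict.mk p).get? "age_min"
  let amax? := (PySem.Dict.mk p).get? "age_max"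
  if amin?.isNone && amax?.isNone then []
  else
    let amin := amin?.getD 0
    let amax := amax?.getD amin
    let amin' := if amax < amin then amax else amin
    let amax' := if amax < amin then amin else amax
    let bands : List (String × (Int × Int)) :=
      [("0-2 yr", (0, 2)), ("3-5 yr", (3, 5)), ("6-8 yr", (6, 8)), ("9-11 yr", (9, 11))]
    bands.foldl (fun out kv =>
      if ¬(amax' < kv.2.1 ∨ amin' > kv.2.2) then out ++ [kv.1] else out) []

-- ===== PORT B =====
def overlapping_age_bands_alt (p : List (String × Int)) : List String :=
  let amin? := (PySem.Dict.mk p).get? "age_min"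
  let amax? := (PySem.Dict.mk p).get? "age_max"
  if amin?.isNone && amax?.isNone then []
  else
    let amin := amin?.getD 0
    let amax := amax?.getD amin
    let amin' := if amax < amin then amax else amin
    let amax' := if amax < amin then amin else amax
    let kmin := max 0 (-(PySem.Int.floordiv (2 - amin') 3))
    let kmax := min 3 (PySem.Int.floordiv amax' 3)
    (PySem.List.pyRange kmin (kmax + 1) 1).map (fun k =>
      PySem.Int.toStr (3 * k) ++ "-" ++ PySem.Int.toStr (3 * k + 2) ++ " yr")

-- ===== PRECONDITION & SPEC =====
def Spec_overlapping_age_bands (p : List (String × Int)) (out : List String) : Prop := out = overlapping_age_bands_alt p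
instance (p : List (String × Int)) (out : List String) : Decidable (Spec_overlapping_age_bands p out) := by unfold Spec_overlapping_age_bands; infer_instance

-- ===== CLAIM (what is proved, stated in full; the proofs are below) =====
def Claim_equal_overlapping_age_bands : Prop := ∀ (p : List (String × Int)), Dom_overlapping_age_bands p → Spec_overlapping_age_bands p (overlapping_age_bands p)

-- ===== LEMMAS AND PROOFS =====

-- The core equality: the 4-band scan equals the closed-form index range, for a ≤ b.
theorem pv_core (a b : Int) (hab : a ≤ b) :
    ([("0-2 yr", ((0:Int), (2:Int))), ("3-5 yr", (3, 5)), ("6-8 yr", (6, 8)), ("9-11 yr", (9, 11))].foldl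
      (fun out kv => if ¬(b < kv.2.1 ∨ a > kv.2.2) then out ++ [kv.1] else out) [])
    = (PySem.List.pyRange (max 0 (-(PySem.Int.floordiv (2 - a) 3)))
        (min 3 (PySem.Int.floordiv b 3) + 1) 1).map (fun k =>
          PySem.Int.toStr (3 * k) ++ "-" ++ PySem.Int.toStr (3 * k + 2) ++ " yr") := by
  rw [PySem.Int.floordiv_eq_ediv_of_pos (by norm_num : (0:Int) < 3),
      PySem.Int.floordiv_eq_ediv_of_pos (by norm_num : (0:Int) < 3)]
  simp only [List.foldl_cons, List.foldl_nil]
  split_ifs <;>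
  first
    | (exfalso; omega)
    | (rw [PySem.List.pyRange_one_eq_nil (by omega)]; rfl)
    | (rw [show max 0 (-((2 - a) / 3)) = (0:Int) from by omega,
            show min 3 (b / 3) = (0:Int) from by omega]; decide)
    | (rw [show max 0 (-((2 - a) / 3)) = (0:Int) from by omega,
            show min 3 (b / 3) = (1:Int) from by omega]; decide)
    | (rw [show max 0 (-((2 - a) / 3)) = (0:Int) from by omega,
            show min 3 (b / 3) = (2:Int) from by omega]; decide)
    | (rw [show max 0 (-((2 - a) / 3)) = (0:Int) from by omega,
            show min 3 (b / 3) = (3:Int) from by omega]; decide)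
    | (rw [show max 0 (-((2 - a) / 3)) = (1:Int) from by omega,
            show min 3 (b / 3) = (1:Int) from by omega]; decide)
    | (rw [show max 0 (-((2 - a) / 3)) = (1:Int) from by omega,
            show min 3 (b / 3) = (2:Int) from by omega]; decide)
    | (rw [show max 0 (-((2 - a) / 3)) = (1:Int) from by omega,
            show min 3 (b / 3) = (3:Int) from by omega]; decide)
    | (rw [show max 0 (-((2 - a) / 3)) = (2:Int) from by omega,
            show min 3 (b / 3) = (2:Int) from by omega]; decide)
    | (rw [show max 0 (-((2 - a) / 3)) = (2:Int) from by omega,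
            show min 3 (b / 3) = (3:Int) from by omega]; decide)
    | (rw [show max 0 (-((2 - a) / 3)) = (3:Int) from by omega,
            show min 3 (b / 3) = (3:Int) from by omega]; decide)

theorem overlapping_age_bands_spec : Claim_equal_overlapping_age_bands := by
  intro p _
  unfold Spec_overlapping_age_bands overlapping_age_bands overlapping_age_bands_alt
  cases hmin : (PySem.Dict.mk p).get? "age_min" <;>
    cases hmax : (PySem.Dict.mk p).get? "age_max" <;>
    simp only [Option.isNone, Option.getD, Bool.and_self, if_true, Bool.and_false,
      Bool.false_and] <;>
    try rfl
  all_goals (split_ifs <;> first | rfl | (refine pv_core _ _ ?_; omega))
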